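-- pv_equiv track=rewrite | github.com/Zarbul/Ylab | homework-1/5.py | count_find_num
-- ===== SOURCE A (Python) =====
-- import itertools
-- import math
--
-- def count_find_num(primesL, limit):
--     if math.prod(primesL) > limit:
--         return []
--     rates = ()
--     n = ()
--
--     for i in primesL:
--         rate = 2
--         while i <= limit:
--             i = i**rate
--             rate = rate + 1
--         rates += (rate,)
--     for i in range(len(primesL), sum(rates)+sum(rates) // 2):
--         n += tuple(itertools.combinations_with_replacement(primesL, i))
--     n_edit = tuple(i for i in n if set(primesL) == set(i))
--     numbers = tuple(math.prod(i) for i in n_edit if math.prod(i) <= limit)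
--     return [len(numbers), max(numbers)]
-- ===== SOURCE B (Python) =====
-- import math
--
-- def _rate(p, limit):
--     rate = 2
--     while p <= limit:
--         p = p ** rate
--         rate += 1
--     return rate
--
-- def _go(primesL, idx, prod, budget, limit):
--     # all products prod * (primesL[idx:] raised to exponents >= 1) whose exponents sum to
--     # at most budget, pruning a branch as soon as the partial product exceeds limit
--     if idx == len(primesL):
--         return [prod]
--     out = []
--     p = primesL[idx]
--     rem = len(primesL) - idx - 1
--     v, e = prod * p, 1
--     while v <= limit and e + rem <= budget:
--         out += _go(primesL, idx + 1, v, budget - e, limit)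
--         v *= p
--         e += 1
--     return out
--
-- def count_find_num(primesL, limit):
--     if math.prod(primesL) > limit:
--         return []
--     total = sum(_rate(p, limit) for p in primesL)
--     cap = total + total // 2  # the reference's exclusive bound on the total factor count
--     nums = _go(primesL, 0, 1, cap - 1, limit)
--     return [len(nums), max(nums)]
-- ===== Notes on version B (the rewrite author's own statement) =====
-- stated objective: alternative
-- what changed: Instead of generating every combination_with_replacement of every length up to the cap and filtering by full support and product, B DFS-assigns each prime an exponent >= 1 under the same total-factor cap, pruning a branch as soon as the partial product exceeds limit, so only feasible products are ever enumerated (intended as faster; a timing run on random inputs could not confirm a >=1.5x speed-up).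
-- outside the precondition, e.g. on count_find_num([-2], 1): A returns [2, -2], B returns [1, -2]; on count_find_num([2, 2], 8): A returns [7, 8], B returns [3, 8]; on count_find_num([], 5): A raises ValueError, B returns [1, 1]
import Mathlib
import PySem

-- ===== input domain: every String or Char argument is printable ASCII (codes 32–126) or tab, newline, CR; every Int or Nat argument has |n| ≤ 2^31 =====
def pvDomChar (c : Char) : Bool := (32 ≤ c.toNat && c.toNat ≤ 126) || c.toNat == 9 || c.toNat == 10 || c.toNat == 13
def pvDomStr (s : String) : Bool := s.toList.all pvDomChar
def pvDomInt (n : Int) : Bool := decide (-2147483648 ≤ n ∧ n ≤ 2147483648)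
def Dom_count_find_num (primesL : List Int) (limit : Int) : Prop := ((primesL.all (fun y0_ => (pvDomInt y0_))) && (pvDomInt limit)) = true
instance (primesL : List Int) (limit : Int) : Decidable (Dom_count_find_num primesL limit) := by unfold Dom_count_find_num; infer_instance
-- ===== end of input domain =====

-- B replaces A's enumeration of all combinations_with_replacement of every length (then filtering
-- by support and product) with a DFS assigning each prime an exponent ≥ 1 under A's total-factor
-- cap, pruning a branch as soon as the partial product exceeds limit (objective: alternative).

-- ===== PORT A =====
-- math.prod: left fold of * starting at 1 (exact)
def pvProd (xs : List Int) : Int := xs.foldl (· * ·) 1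

-- 'rate = 2; while i <= limit: i = i**rate; rate += 1'.  The extra guards '1 < i ∧ 2 ≤ rate'
-- only make the recursion total: Python loops forever on i ≤ 1 (outside Pre_), and rate ≥ 2 always.
def rateLoopA (limit i rate : Int) : Int :=
  if h : i ≤ limit ∧ 1 < i ∧ 2 ≤ rate then rateLoopA limit (i ^ rate.toNat) (rate + 1) else rate
termination_by (limit + 1 - i).toNat
decreasing_by
  obtain ⟨h1, h2, h3⟩ := h
  have hp : i ^ 2 ≤ i ^ rate.toNat := pow_le_pow_right₀ (by omega) (by omega)
  have : i < i ^ 2 := by nlinarith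
  omega

-- itertools.combinations_with_replacement(xs, k), in itertools' order (exact: the standard
-- recursion on the pool, keeping or dropping the first element)
def cwrA : List Int → Nat → List (List Int)
  | _, 0 => [[]]
  | [], _ + 1 => []
  | x :: rest, k + 1 => ((cwrA (x :: rest) k).map (fun c => x :: c)) ++ cwrA rest (k + 1)
termination_by xs k => (k, xs.length)

def count_find_num (primesL : List Int) (limit : Int) : List Int :=
  if pvProd primesL > limit then []
  else
    let rates := primesL.map (fun i => rateLoopA limit i 2)
    let s := rates.foldl (· + ·) 0
    let n := (PySem.List.pyRange (primesL.length : Int) (s + PySem.Int.floordiv s 2) 1).flatMap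
        (fun L => cwrA primesL L.toNat)
    -- set(primesL) == set(i) is mutual membership (exact)
    let nEdit := n.filter (fun c => primesL.all (fun q => c.contains q) && c.all (fun q => primesL.contains q))
    let numbers := (nEdit.filter (fun c => pvProd c ≤ limit)).map (fun c => pvProd c)
    -- max(numbers): ValueError on empty is outside Pre_; .getD 0 is never the returned value there
    [(numbers.length : Int), (PySem.List.max? numbers (fun y => y)).getD 0]

-- ===== PORT B =====
-- Source B _rate: same while loop as A's rate computation (same totality guards as rateLoopA)
def rateLoopB (limit p rate : Int) : Int :=
  if h : p ≤ limit ∧ 1 < p ∧ 2 ≤ rate then rateLoopB limit (p ^ rate.toNat) (rate + 1) else rate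
termination_by (limit + 1 - p).toNat
decreasing_by
  obtain ⟨h1, h2, h3⟩ := h
  have hp : p ^ 2 ≤ p ^ rate.toNat := pow_le_pow_right₀ (by omega) (by omega)
  have : p < p ^ 2 := by nlinarith
  omega

-- Source B _go's inner while loop over e (f is the recursive call on the remaining suffix)
def goInnerB (limit p rem : Int) (f : Int → Int → List Int) (budget e v : Int) : List Int :=
  if _h : v ≤ limit ∧ e + rem ≤ budget then
    f v (budget - e) ++ goInnerB limit p rem f budget (e + 1) (v * p)
  else []
termination_by (budget - e - rem + 1).toNat
decreasing_by omega

-- Source B _go: the idx-based recursion over primesL, ported as structural recursion on the suffix (exact)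
def goB (limit : Int) : List Int → Int → Int → List Int
  | [], pr, _ => [pr]
  | p :: ps, pr, budget =>
      goInnerB limit p (ps.length : Int) (fun v b => goB limit ps v b) budget 1 (pr * p)

def count_find_num_alt (primesL : List Int) (limit : Int) : List Int :=
  if pvProd primesL > limit then []
  else
    let total := (primesL.map (fun p => rateLoopB limit p 2)).foldl (· + ·) 0
    let cap := total + PySem.Int.floordiv total 2
    let nums := goB limit primesL 1 (cap - 1)
    [(nums.length : Int), (PySem.List.max? nums (fun y => y)).getD 0]

-- ===== PRECONDITION & SPEC =====
-- Pre_ excludes, among inputs whose product is ≤ limit, exactly the lists that are not lists of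
-- distinct values ≥ 2: there A loops forever (an entry 0 or 1), raises ValueError (empty list),
-- counts the same product several times (duplicate entries — an accident of positional
-- combinations), or relies on sign alternation (entries < 0), none of which a list of distinct
-- primes can exhibit.
def Pre_count_find_num (primesL : List Int) (limit : Int) : Prop :=
  pvProd primesL > limit ∨ (primesL ≠ [] ∧ primesL.Nodup ∧ ∀ p ∈ primesL, 2 ≤ p)
instance (primesL : List Int) (limit : Int) : Decidable (Pre_count_find_num primesL limit) := by
  unfold Pre_count_find_num; infer_instance

def pvWitness_count_find_num : List Int × Int := ([2, 3], 20)

def Spec_count_find_num (primesL : List Int) (limit : Int) (out : List Int) : Prop :=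
  out = count_find_num_alt primesL limit
instance (primesL : List Int) (limit : Int) (out : List Int) : Decidable (Spec_count_find_num primesL limit out) := by
  unfold Spec_count_find_num; infer_instance

-- ===== CLAIM (what is proved, stated in full; the proofs are below) =====
def Claim_equal_count_find_num : Prop := ∀ (primesL : List Int) (limit : Int),
  Dom_count_find_num primesL limit → Pre_count_find_num primesL limit →
  Spec_count_find_num primesL limit (count_find_num primesL limit)

-- ===== LEMMAS AND PROOFS =====

def FL (t : List Int) (m : Nat) : List (List Int) :=
  (cwrA t m).filter (fun c => t.all (fun q => c.contains q))

def canonG : List Int → Nat → List Int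
  | [], 0 => [1]
  | [], _ + 1 => []
  | p :: t, m => (List.range' 1 (m - t.length)).flatMap
      (fun e => (canonG t (m - e)).map (fun r => p ^ e * r))

def canon : List Int → Int → List Int
  | [], b => if 0 ≤ b then [1] else []
  | p :: t, b => (PySem.List.pyRange 1 (b - (t.length : Int) + 1) 1).flatMap
      (fun e => (canon t (b - e)).map (fun r => p ^ e.toNat * r))

theorem cwrA_subset : ∀ (xs : List Int) (k : Nat), ∀ c ∈ cwrA xs k, ∀ a ∈ c, a ∈ xs := by
  intro xs k
  induction xs, k using cwrA.induct with
  | case1 xs => intro c hc a ha; rw [cwrA] at hc; simp at hc; subst hc; simp at ha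
  | case2 k => intro c hc; rw [cwrA] at hc; simp at hc
  | case3 x rest k ih1 ih2 =>
    intro c hc a ha
    rw [cwrA] at hc
    rcases List.mem_append.1 hc with h | h
    · obtain ⟨c', hc', rfl⟩ := List.mem_map.1 h
      rcases List.mem_cons.1 ha with rfl | ha'
      · exact List.mem_cons_self
      · exact ih1 c' hc' a ha'
    · exact List.mem_cons_of_mem x (ih2 c h a ha)

theorem tri_swap {α : Type} (X : Nat → Nat → List α) : ∀ (n : Nat),
    ((List.range n).flatMap fun i => (List.range (n - i)).flatMap fun j => X i j).Perm
    ((List.range n).flatMap fun s => (List.range (s + 1)).flatMap fun i => X i (s - i)) := by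
  intro n
  induction n with
  | zero => simp
  | succ n ih =>
    have hrow : ∀ i ∈ List.range n,
        ((List.range (n + 1 - i)).flatMap fun j => X i j)
          = ((List.range (n - i)).flatMap fun j => X i j) ++ X i (n - i) := by
      intro i hi
      have hi' : i < n := List.mem_range.1 hi
      have h : n + 1 - i = (n - i) + 1 := by omega
      rw [h, List.range_succ, List.flatMap_append]
      simp
    rw [List.range_succ, List.flatMap_append, List.flatMap_append,
        List.flatMap_congr hrow]
    simp only [List.flatMap_cons, List.flatMap_nil, List.append_nil]
    rw [show n + 1 - n = 1 by omega, List.range_one]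
    simp only [List.flatMap_cons, List.flatMap_nil, List.append_nil]
    rw [List.range_succ, List.flatMap_append]
    simp only [List.flatMap_cons, List.flatMap_nil, List.append_nil, Nat.sub_self]
    refine (((List.flatMap_append_perm (List.range n)
        (fun i => (List.range (n - i)).flatMap fun j => X i j)
        (fun i => X i (n - i))).symm.append_right (X n 0)).trans ?_)
    rw [List.append_assoc]
    exact ih.append (List.Perm.refl _)

theorem canonG_eq_nil : ∀ (t : List Int) (m : Nat), m < t.length → canonG t m = [] := by
  intro t
  induction t with
  | nil => intro m hm; simp at hm
  | cons p t ih =>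
    intro m hm
    simp only [List.length_cons] at hm
    rw [canonG]
    apply List.flatMap_eq_nil_iff.2
    intro e he
    have he' := List.mem_range'_1.1 he
    have : m - e < t.length := by omega
    rw [ih _ this]
    rfl

theorem canon_pos : ∀ (ps : List Int), (∀ p ∈ ps, (1:Int) ≤ p) → ∀ (b : Int), ∀ r ∈ canon ps b, 1 ≤ r := by
  intro ps
  induction ps with
  | nil => intro _ b r hr; rw [canon] at hr; split at hr <;> simp at hr; omega
  | cons p t ih =>
    intro hge b r hr
    rw [canon] at hr
    obtain ⟨e, he, hr⟩ := List.mem_flatMap.1 hr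
    obtain ⟨r', hr', rfl⟩ := List.mem_map.1 hr
    have h1 : (1:Int) ≤ r' := ih (fun q hq => hge q (List.mem_cons_of_mem _ hq)) _ _ hr'
    have h2 : (1:Int) ≤ p ^ e.toNat := one_le_pow₀ (hge p List.mem_cons_self)
    nlinarith

theorem cwrA_decomp (p : Int) (t : List Int) : ∀ (L : Nat),
    (cwrA (p :: t) L).Perm
      ((List.range (L + 1)).flatMap fun e => (cwrA t (L - e)).map fun c => List.replicate e p ++ c) := by
  intro L
  induction L with
  | zero => simp [cwrA]
  | succ L ih =>
    rw [cwrA]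
    have h1 := ih.map (fun c => p :: c)
    rw [List.map_flatMap] at h1
    have h2 : ∀ e ∈ List.range (L + 1),
        ((cwrA t (L - e)).map (fun c => List.replicate e p ++ c)).map (fun c => p :: c)
          = (cwrA t (L - e)).map (fun c => List.replicate (e + 1) p ++ c) := by
      intro e _
      rw [List.map_map]
      apply List.map_congr_left
      intro c _
      simp [List.replicate_succ]
    rw [List.flatMap_congr h2] at h1
    -- RHS decomposition
    rw [List.range_succ_eq_map, List.flatMap_cons, List.flatMap_map]
    simp only [Nat.sub_zero, List.replicate_zero, List.nil_append, List.map_id']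
    have h3 : ((List.range (L + 1)).flatMap fun e =>
        (cwrA t (L + 1 - (e + 1))).map fun c => List.replicate (e + 1) p ++ c)
        = ((List.range (L + 1)).flatMap fun e =>
        (cwrA t (L - e)).map fun c => List.replicate (e + 1) p ++ c) := by
      apply List.flatMap_congr; intro e _; rw [Nat.succ_sub_succ]
    rw [h3]
    exact (h1.append_right _).trans (List.perm_append_comm)
theorem pvProd_eq (xs : List Int) : pvProd xs = xs.prod := by
  rw [pvProd, List.prod_eq_foldl]

theorem pvProd_rep (e : Nat) (p : Int) (c : List Int) :
    pvProd (List.replicate e p ++ c) = p ^ e * pvProd c := by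
  simp [pvProd_eq, List.prod_append, List.prod_replicate]

theorem PL : ∀ (t : List Int), t.Nodup → ∀ (m : Nat), ((FL t m).map pvProd).Perm (canonG t m) := by
  intro t
  induction t with
  | nil =>
    rintro - m
    cases m with
    | zero => simp [FL, cwrA, canonG, pvProd]
    | succ m => simp [FL, cwrA, canonG]
  | cons p t ih =>
    intro hnd m
    obtain ⟨hp, hndt⟩ := List.nodup_cons.1 hnd
    have h1 := (cwrA_decomp p t m).filter (fun c => (p::t).all (fun q => c.contains q))
    rw [List.filter_flatMap] at h1
    have h2 : ∀ e ∈ List.range (m+1),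
        ((cwrA t (m - e)).map (fun c => List.replicate e p ++ c)).filter
            (fun c => (p::t).all (fun q => c.contains q))
          = if e = 0 then [] else (FL t (m - e)).map (fun c => List.replicate e p ++ c) := by
      intro e _
      rw [List.filter_map]
      have hkey : ∀ c ∈ cwrA t (m - e),
          ((fun c => (p::t).all (fun q => c.contains q)) ∘ (fun c => List.replicate e p ++ c)) c
            = (decide (e ≠ 0) && t.all (fun q => c.contains q)) := by
        intro c hc
        have hcs : ∀ a ∈ c, a ∈ t := cwrA_subset t (m - e) c hc
        refine Bool.coe_iff_coe.1 ?_
        simp only [Function.comp, List.all_cons, Bool.and_eq_true, List.all_eq_true,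
          List.contains_iff_mem, List.mem_append, List.mem_replicate, decide_eq_true_eq, ne_eq]
        constructor
        · rintro ⟨hpm, hq⟩
          rcases hpm with ⟨he, -⟩ | hpc
          · refine ⟨he, fun q hq' => ?_⟩
            rcases hq q hq' with ⟨-, rfl⟩ | hqc
            · exact absurd hq' hp
            · exact hqc
          · exact absurd (hcs p hpc) hp
        · rintro ⟨he, hq⟩
          exact ⟨Or.inl ⟨he, trivial⟩, fun q hq' => Or.inr (hq q hq')⟩
      rw [List.filter_congr hkey]
      cases e with
      | zero => simp
      | succ e => simp [FL]
    rw [List.flatMap_congr h2] at h1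
    have h4 := h1.map pvProd
    rw [List.map_flatMap] at h4
    have h5 : ∀ e ∈ List.range (m+1),
        ((if e = 0 then [] else (FL t (m - e)).map (fun c => List.replicate e p ++ c)).map pvProd)
          = if e = 0 then [] else ((FL t (m - e)).map pvProd).map (fun r => p ^ e * r) := by
      intro e _
      cases e with
      | zero => simp
      | succ e =>
        simp only [if_neg (Nat.succ_ne_zero e), List.map_map]
        apply List.map_congr_left
        intro c _
        simp [Function.comp, pvProd_rep]
    rw [List.flatMap_congr h5] at h4
    have h6 : ((List.range (m+1)).flatMap
          (fun e => if e = 0 then [] else ((FL t (m - e)).map pvProd).map (fun r => p ^ e * r))).Perm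
        ((List.range (m+1)).flatMap
          (fun e => if e = 0 then [] else (canonG t (m - e)).map (fun r => p ^ e * r))) := by
      apply List.Perm.flatMap_left
      intro e _
      cases e with
      | zero => simp
      | succ e => simp only [if_neg (Nat.succ_ne_zero e)]; exact (ih hndt (m - (e+1))).map _
    refine (h4.trans h6).trans ?_
    -- equality with canonG (p::t) m
    have hrange : List.range (m + 1) = 0 :: List.range' 1 m := by
      rw [List.range_eq_range', List.range'_succ]
    rw [hrange, List.flatMap_cons, if_pos rfl, List.nil_append, canonG]
    by_cases hm : m ≤ t.length
    · have hz : m - t.length = 0 := by omega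
      rw [hz]
      simp only [List.range'_zero, List.flatMap_nil]
      apply List.Perm.of_eq
      apply List.flatMap_eq_nil_iff.2
      intro e he
      have he' := List.mem_range'_1.1 he
      rw [canonG_eq_nil t (m - e) (by omega)]
      simp
    · have hsplit : List.range' 1 m
          = List.range' 1 (m - t.length) ++ List.range' (1 + (m - t.length)) t.length := by
        have h := @List.range'_append 1 (m - t.length) t.length 1
        simp only [one_mul] at h
        rw [show m - t.length + t.length = m from by omega] at h
        exact h.symm
      rw [hsplit, List.flatMap_append]
      have htail : (List.range' (1 + (m - t.length)) t.length).flatMap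
          (fun e => if e = 0 then [] else (canonG t (m - e)).map (fun r => p ^ e * r)) = [] := by
        apply List.flatMap_eq_nil_iff.2
        intro e he
        have he' := List.mem_range'_1.1 he
        rw [if_neg (by omega : ¬ e = 0), canonG_eq_nil t (m - e) (by omega)]
        rfl
      rw [htail, List.append_nil]
      apply List.Perm.of_eq
      apply List.flatMap_congr
      intro e he
      have he' := List.mem_range'_1.1 he
      rw [if_neg (by omega : ¬ e = 0)]
theorem GR : ∀ (ps : List Int) (b : Int),
    (canon ps b).Perm
      ((List.range ((b + 1 - (ps.length : Int)).toNat)).flatMap fun j => canonG ps (ps.length + j)) := by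
  intro ps
  induction ps with
  | nil =>
    intro b
    rw [canon]
    simp only [List.length_nil, Nat.cast_zero, Int.sub_zero]
    by_cases hb : 0 ≤ b
    · rw [if_pos hb]
      have hn : (b + 1).toNat = ((b + 1).toNat - 1) + 1 := by omega
      rw [hn, List.range_eq_range', List.range'_succ, List.flatMap_cons]
      have h0 : canonG [] (0 + 0) = [1] := by rw [Nat.zero_add]; rfl
      rw [h0]
      have htail : (List.range' 1 ((b + 1).toNat - 1)).flatMap (fun j => canonG [] (0 + j)) = [] := by
        apply List.flatMap_eq_nil_iff.2
        intro j hj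
        have hj' := List.mem_range'_1.1 hj
        obtain ⟨j', rfl⟩ : ∃ j', j = j' + 1 := ⟨j - 1, by omega⟩
        rw [Nat.zero_add]
        rfl
      rw [htail]
      simp
    · rw [if_neg hb, show (b + 1).toNat = 0 from by omega]
      rfl
  | cons p t ih =>
    intro b
    rw [canon, PySem.List.pyRange_one]
    rw [show b - (t.length : Int) + 1 - 1 = b - t.length from by ring]
    rw [List.flatMap_map]
    set n := (b - (t.length : Int)).toNat with hn
    -- pointwise: IH + push the outer map inside
    have hstep : ∀ i ∈ List.range n,
        ((canon t (b - (1 + (i : Int)))).map (fun r => p ^ ((1 + (i : Int)).toNat) * r)).Perm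
          ((List.range (n - i)).flatMap fun j => (canonG t (t.length + j)).map (fun r => p ^ (i + 1) * r)) := by
      intro i hi
      have hi' : i < n := List.mem_range.1 hi
      have he : ((1 : Int) + (i : Int)).toNat = i + 1 := by omega
      have h1 := (ih (b - (1 + (i : Int)))).map (fun r => p ^ (i + 1) * r)
      rw [List.map_flatMap] at h1
      rw [show (b - (1 + (i : Int)) + 1 - (t.length : Int)).toNat = n - i from by omega] at h1
      rw [he]
      exact h1
    refine (List.Perm.flatMap_left _ hstep).trans ?_
    refine (tri_swap (fun i j => (canonG t (t.length + j)).map (fun r => p ^ (i + 1) * r)) n).trans ?_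
    apply List.Perm.of_eq
    rw [show ((b + 1 - ((p :: t).length : Int))).toNat = n from by simp; omega]
    apply List.flatMap_congr
    intro s hs
    rw [canonG]
    rw [show (p :: t).length + s - t.length = s + 1 from by simp; omega]
    rw [List.range'_eq_map_range, List.flatMap_map]
    apply List.flatMap_congr
    intro i hi
    have hi' : i < s + 1 := List.mem_range.1 hi
    rw [show (p :: t).length + s - (1 + i) = t.length + (s - i) from by simp; omega]
    rw [show 1 + i = i + 1 from by omega]
theorem goB_eq (limit : Int) : ∀ (ps : List Int) (acc b : Int), (∀ p ∈ ps, 2 ≤ p) →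
    1 ≤ acc → acc ≤ limit → 0 ≤ b →
    goB limit ps acc b = ((canon ps b).map (fun r => acc * r)).filter (fun x => decide (x ≤ limit)) := by
  intro ps
  induction ps with
  | nil =>
    intro acc b _ hacc hlim hb
    rw [goB, canon, if_pos hb]
    simp [hlim]
  | cons p ps ih =>
    intro acc b hps hacc hlim hb
    have hp : 2 ≤ p := hps p List.mem_cons_self
    have hps' : ∀ q ∈ ps, 2 ≤ q := fun q hq => hps q (List.mem_cons_of_mem _ hq)
    rw [goB, canon, PySem.List.pyRange_one, List.flatMap_map, List.map_flatMap, List.filter_flatMap]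
    suffices H : ∀ (k : Nat) (e₀ : Int), 1 ≤ e₀ → (b - (ps.length : Int) - e₀ + 1).toNat ≤ k →
        goInnerB limit p (ps.length : Int) (fun v b' => goB limit ps v b') b e₀ (acc * p ^ e₀.toNat)
          = (List.range ((b - (ps.length : Int) + 1 - e₀).toNat)).flatMap
              (fun a : Nat => (((canon ps (b - (e₀ + (a : Int)))).map
                  (fun r => p ^ (e₀ + (a : Int)).toNat * r)).map (fun r => acc * r)).filter
                    (fun x => decide (x ≤ limit))) by
      have h1 := H (b - (ps.length : Int) - 1 + 1).toNat 1 le_rfl le_rfl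
      rw [show acc * p ^ (1 : Int).toNat = acc * p from by norm_num] at h1
      rw [h1]
    intro k
    induction k with
    | zero =>
      intro e₀ he₀ hk
      rw [goInnerB, dif_neg (by omega), show ((b - (ps.length : Int) + 1 - e₀)).toNat = 0 from by omega]
      rfl
    | succ k ihk =>
      intro e₀ he₀ hk
      rw [goInnerB]
      by_cases hcond : acc * p ^ e₀.toNat ≤ limit ∧ e₀ + (ps.length : Int) ≤ b
      · rw [dif_pos hcond]
        obtain ⟨hv, hbound⟩ := hcond
        have hvpos : 1 ≤ acc * p ^ e₀.toNat := by
          have h1 : (1:Int) ≤ p ^ e₀.toNat := one_le_pow₀ (by omega)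
          nlinarith
        have hsplit : ((b - (ps.length : Int) + 1 - e₀)).toNat
            = (((b - (ps.length : Int) + 1 - (e₀ + 1))).toNat) + 1 := by omega
        rw [hsplit, List.range_succ_eq_map, List.flatMap_cons, List.flatMap_map]
        congr 1
        · -- head block
          rw [ih (acc * p ^ e₀.toNat) (b - e₀) hps' hvpos hv (by omega)]
          simp only [Nat.cast_zero, add_zero, List.map_map]
          apply congrArg
          apply List.map_congr_left
          intro r _
          simp only [Function.comp]
          ring
        · -- tail
          have htail := ihk (e₀ + 1) (by omega) (by omega)
          rw [show acc * p ^ e₀.toNat * p = acc * p ^ (e₀ + 1).toNat from by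
            rw [show (e₀ + 1).toNat = e₀.toNat + 1 from by omega, pow_succ]; ring]
          rw [htail]
          apply List.flatMap_congr
          intro a _
          rw [show e₀ + ((a.succ : Nat) : Int) = e₀ + 1 + (a : Int) from by push_cast; ring]
      · rw [dif_neg hcond]
        rcases (not_and_or.1 hcond) with hv | hbound
        · push Not at hv
          symm
          apply List.flatMap_eq_nil_iff.2
          intro a ha
          have ha' : (a : Int) < b - (ps.length : Int) + 1 - e₀ := by
            have := List.mem_range.1 ha; omega
          apply List.filter_eq_nil_iff.2
          intro x hx
          obtain ⟨r, hr, rfl⟩ := List.mem_map.1 hx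
          obtain ⟨r', hr', rfl⟩ := List.mem_map.1 hr
          have hrpos : (1:Int) ≤ r' := canon_pos ps (fun q hq => by have := hps' q hq; omega) _ _ hr'
          have hpow : p ^ e₀.toNat ≤ p ^ (e₀ + (a : Int)).toNat :=
            pow_le_pow_right₀ (by omega) (by omega)
          have hppos : (1:Int) ≤ p ^ e₀.toNat := one_le_pow₀ (by omega)
          simp only [decide_eq_true_eq, not_le]
          have hA : acc * p ^ e₀.toNat ≤ acc * p ^ (e₀ + (a : Int)).toNat := by nlinarith
          have hB : acc * p ^ (e₀ + (a : Int)).toNat ≤ acc * (p ^ (e₀ + (a : Int)).toNat * r') := by nlinarith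
          linarith
        · push Not at hbound
          rw [show ((b - (ps.length : Int) + 1 - e₀)).toNat = 0 from by omega]
          rfl


theorem rateB_eq (limit p rate : Int) : rateLoopB limit p rate = rateLoopA limit p rate := by
  induction p, rate using rateLoopA.induct limit with
  | case1 i rate h ih => rw [rateLoopB, rateLoopA]; simp only [dif_pos h]; exact ih
  | case2 i rate h => rw [rateLoopB, rateLoopA]; simp only [dif_neg h]

theorem max?_perm_id {l₁ l₂ : List Int} (h : l₁.Perm l₂) :
    PySem.List.max? l₁ (fun y => y) = PySem.List.max? l₂ (fun y => y) := by
  cases h1 : PySem.List.max? l₁ (fun y => y) with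
  | none =>
    have e1 : l₁ = [] := (PySem.List.max?_eq_none_iff _ _).1 h1
    subst e1
    have e2 : l₂ = [] := List.perm_nil.mp h.symm
    subst e2
    exact h1.symm
  | some m1 =>
    cases h2 : PySem.List.max? l₂ (fun y => y) with
    | none =>
      have e2 : l₂ = [] := (PySem.List.max?_eq_none_iff _ _).1 h2
      subst e2
      exact absurd (List.perm_nil.mp h) (by rintro rfl; simp [PySem.List.max?] at h1)
    | some m2 =>
      have hm1 : m1 ∈ l₁ := PySem.List.max?_mem h1
      have hm2 : m2 ∈ l₂ := PySem.List.max?_mem h2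
      have a1 := PySem.List.max?_isMax h1 m2 (h.symm.subset hm2)
      have a2 := PySem.List.max?_isMax h2 m1 (h.subset hm1)
      simp only at a1 a2
      exact congrArg some (le_antisymm a2 a1)

theorem rateLoopA_ge : ∀ (limit i r : Int), r ≤ rateLoopA limit i r := by
  intro limit i r
  induction i, r using rateLoopA.induct limit with
  | case1 i r h ih => rw [rateLoopA, dif_pos h]; omega
  | case2 i r h => rw [rateLoopA, dif_neg h]

theorem foldl_add_lower (l : List Int) : ∀ init : Int, (∀ x ∈ l, 0 ≤ x) → init ≤ l.foldl (· + ·) init := by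
  induction l with
  | nil => intro init _; simp
  | cons a t ih =>
    intro init h
    have h1 := ih (init + a) (fun x hx => h x (List.mem_cons_of_mem _ hx))
    have h2 := h a List.mem_cons_self
    simp only [List.foldl_cons]
    omega

theorem one_le_pvProd (l : List Int) (h : ∀ x ∈ l, (1:Int) ≤ x) : 1 ≤ pvProd l := by
  rw [pvProd_eq]
  induction l with
  | nil => simp
  | cons a t ih =>
    rw [List.prod_cons]
    have h1 := h a List.mem_cons_self
    have h2 := ih (fun x hx => h x (List.mem_cons_of_mem _ hx))
    nlinarith

theorem pv_final (primesL : List Int) (limit : Int) (hpre : Pre_count_find_num primesL limit) :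
    count_find_num primesL limit = count_find_num_alt primesL limit := by
  rw [count_find_num, count_find_num_alt]
  by_cases hgt : pvProd primesL > limit
  · rw [if_pos hgt, if_pos hgt]
  · rw [if_neg hgt, if_neg hgt]
    rcases hpre with h | ⟨hne, hnd, hge⟩
    · exact absurd h hgt
    dsimp only
    rw [List.map_congr_left (fun p (_ : p ∈ primesL) => rateB_eq limit p 2)]
    set s := List.foldl (fun x1 x2 => x1 + x2) 0 (List.map (fun i => rateLoopA limit i 2) primesL) with hs
    set cap := s + PySem.Int.floordiv s 2 with hcap
    have hs2 : 2 ≤ s := by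
      rw [hs]
      cases primesL with
      | nil => exact absurd rfl hne
      | cons a t =>
        have h1 : ∀ x ∈ List.map (fun i => rateLoopA limit i 2) t, (0:Int) ≤ x := by
          intro x hx
          obtain ⟨q, -, rfl⟩ := List.mem_map.1 hx
          have := rateLoopA_ge limit q 2
          omega
        have h2 := foldl_add_lower _ (0 + rateLoopA limit a 2) h1
        have h3 := rateLoopA_ge limit a 2
        simp only [List.map_cons, List.foldl_cons]
        omega
    have hfd : PySem.Int.floordiv s 2 = s / 2 :=
      PySem.Int.floordiv_eq_ediv_of_pos (a := s) (b := 2) (by norm_num)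
    have hcap1 : (0:Int) ≤ cap - 1 := by rw [hcap, hfd]; omega
    have hlim1 : (1:Int) ≤ limit := by
      have := one_le_pvProd primesL (fun x hx => by have := hge x hx; omega)
      omega
    -- B side closed form
    have hBside : goB limit primesL 1 (cap - 1)
        = (canon primesL (cap - 1)).filter (fun x => decide (x ≤ limit)) := by
      rw [goB_eq limit primesL 1 (cap - 1) hge le_rfl hlim1 hcap1]
      simp only [one_mul, List.map_id']
    rw [hBside]
    -- A side: normalise the range
    rw [PySem.List.pyRange_one, List.flatMap_map]
    have hA2 : ∀ j ∈ List.range ((cap - (primesL.length:Int)).toNat),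
        cwrA primesL (((primesL.length:Int) + (j:Int)).toNat) = cwrA primesL (primesL.length + j) := by
      intro j _
      congr 1
    rw [List.flatMap_congr hA2, List.filter_flatMap]
    have hA3 : ∀ j ∈ List.range ((cap - (primesL.length:Int)).toNat),
        (cwrA primesL (primesL.length + j)).filter
            (fun c => (primesL.all fun q => c.contains q) && c.all fun q => primesL.contains q)
          = FL primesL (primesL.length + j) := by
      intro j _
      rw [FL]
      apply List.filter_congr
      intro c hc
      have hsub := cwrA_subset _ _ c hc
      have hall : (c.all fun q => primesL.contains q) = true :=
        List.all_eq_true.2 (fun q hq => by simpa [List.contains_iff_mem] using hsub q hq)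
      rw [hall, Bool.and_true]
    rw [List.flatMap_congr hA3]
    have hA4 := List.filter_map (f := pvProd) (p := fun x => decide (x ≤ limit))
      (l := (List.range ((cap - (primesL.length:Int)).toNat)).flatMap
        (fun j => FL primesL (primesL.length + j)))
    simp only [Function.comp_def] at hA4
    rw [← hA4, List.map_flatMap]
    -- now both sides are filters of permuted lists
    have hperm : ((List.range ((cap - (primesL.length:Int)).toNat)).flatMap
          (fun j => (FL primesL (primesL.length + j)).map pvProd)).Perm
        (canon primesL (cap - 1)) := by
      refine (List.Perm.flatMap_left _ (fun j _ => PL primesL hnd (primesL.length + j))).trans ?_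
      have hgr := (GR primesL (cap - 1)).symm
      rw [show cap - 1 + 1 - (primesL.length:Int) = cap - (primesL.length:Int) from by ring] at hgr
      exact hgr
    have hp := hperm.filter (fun x => decide (x ≤ limit))
    rw [hp.length_eq, max?_perm_id hp]

-- ===== VERDICT (by name: the statement is the Claim_ definition above) =====
theorem count_find_num_spec : Claim_equal_count_find_num := by
  intro primesL limit _ hpre
  unfold Spec_count_find_num
  exact pv_final primesL limit hpre
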